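-- pv_equiv track=rewrite | github.com/GulerSevil/slack_rotation_action | src/goaliebot/core/file_ops.py | _find_target_line_index
-- ===== SOURCE A (Python) =====
-- def _find_target_line_index(lines, current_goalie_index, next_goalie_handle):
--     """Find the index of the next line to mark with ** for the next goalie."""
--     if current_goalie_index < 0:
--         return -1
--
--     # Search after current goalie first
--     for i in range(current_goalie_index + 1, len(lines)):
--         if _line_matches_goalie(lines[i], next_goalie_handle):
--             return i
--
--     # If not found, wrap around to beginning
--     for i in range(0, current_goalie_index):
--         if _line_matches_goalie(lines[i], next_goalie_handle):
--             return i
--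
--     return -1
--
-- def _line_matches_goalie(line, goalie_handle):
--     """Check if a line matches the given goalie handle."""
--     line = line.strip()
--     if not line or line.startswith("#"):
--         return False
--
--     parts = [p.strip() for p in line.split("|")]
--     if len(parts) == 0:
--         return False
--
--     goalie_info = parts[0].replace("**", "").strip()
--     if not goalie_info:
--         return False
--
--     current_handle = goalie_info.split(",")[0].strip()
--     return current_handle == goalie_handle
-- ===== SOURCE B (Python) =====
-- def _find_target_line_index(lines, current_goalie_index, next_goalie_handle):
--     """Single pass over the lines: the first match after the current index wins
--     immediately; otherwise fall back to the first match before it."""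
--     if current_goalie_index < 0:
--         return -1
--     before = -1
--     for i, line in enumerate(lines):
--         if _line_matches_goalie(line, next_goalie_handle):
--             if i > current_goalie_index:
--                 return i
--             if i < current_goalie_index and before == -1:
--                 before = i
--     return before
--
-- def _line_matches_goalie(line, goalie_handle):
--     """Check if a line matches the given goalie handle."""
--     line = line.strip()
--     if not line or line.startswith("#"):
--         return False
--
--     parts = [p.strip() for p in line.split("|")]
--     if len(parts) == 0:
--         return False
--
--     goalie_info = parts[0].replace("**", "").strip()
--     if not goalie_info:
--         return False
--
--     current_handle = goalie_info.split(",")[0].strip()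
--     return current_handle == goalie_handle
-- ===== Notes on version B (the rewrite author's own statement) =====
-- stated objective: simpler
-- what changed: A's two separate index-range loops (after the current index, then wrap-around before it) are replaced by one enumerate pass that returns the first match after the index immediately and keeps the first match before it as a fallback.
-- outside the precondition, e.g. on _find_target_line_index(['@alice | Mon'], 5, '@alice'): A returns 0, B returns 0
import Mathlib
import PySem

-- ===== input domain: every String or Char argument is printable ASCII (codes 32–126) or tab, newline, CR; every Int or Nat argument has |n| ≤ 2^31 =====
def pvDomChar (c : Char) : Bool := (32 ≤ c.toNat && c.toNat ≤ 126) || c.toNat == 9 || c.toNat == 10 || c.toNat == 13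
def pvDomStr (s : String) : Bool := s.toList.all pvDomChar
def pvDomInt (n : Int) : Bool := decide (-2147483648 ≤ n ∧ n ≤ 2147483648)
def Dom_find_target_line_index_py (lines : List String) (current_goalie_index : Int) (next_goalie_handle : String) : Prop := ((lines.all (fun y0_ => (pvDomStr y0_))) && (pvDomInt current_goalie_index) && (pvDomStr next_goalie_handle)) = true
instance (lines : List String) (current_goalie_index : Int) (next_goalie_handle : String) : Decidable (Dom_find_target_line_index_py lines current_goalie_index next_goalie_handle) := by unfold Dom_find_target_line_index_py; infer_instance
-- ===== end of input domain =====

-- B replaces A's two range-loops by one pass over the lines with a first-match-before fallback; objective: simpler.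

-- ===== PORT A =====
-- _line_matches_goalie, shared verbatim by both Pythons (B keeps it unchanged).
-- parts[0] / goalie_info.split(",")[0]: str.split never returns [], so headD "" is exact
-- (the len(parts)==0 guard from the Python is kept, literally, even though it is dead).
def lineMatchesGoalie (line : String) (goalie_handle : String) : Bool :=
  let l := PySem.Str.strip line
  if PySem.Str.len l = 0 || PySem.Str.startswith l "#" then false
  else
    -- line.split("|"): the separator is the non-empty literal "|", so split? is always some
    let parts := ((PySem.Str.split? l "|").getD []).map PySem.Str.strip
    if parts.length = 0 then false
    else
      let goalie_info := PySem.Str.strip (PySem.Str.replace (parts.headD "") "**" "")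
      if PySem.Str.len goalie_info = 0 then false
      else PySem.Str.strip (((PySem.Str.split? goalie_info ",").getD []).headD "") == goalie_handle

-- 'for i in range(i0, b): if _line_matches_goalie(lines[i], h): return i' — one loop of A.
-- lines[i]: (pyGet? …).getD "" — exact under Pre_ (every visited i is then in range).
def scanA (lines : List String) (handle : String) (i b : Int) : Option Int :=
  if h : i < b then
    if lineMatchesGoalie ((PySem.List.pyGet? lines i).getD "") handle then some i
    else scanA lines handle (i + 1) b
  else none
termination_by (b - i).toNat
decreasing_by omega

def find_target_line_index_py (lines : List String) (current_goalie_index : Int) (next_goalie_handle : String) : Int :=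
  if current_goalie_index < 0 then -1
  else
    match scanA lines next_goalie_handle (current_goalie_index + 1) (lines.length : Int) with
    | some i => i
    | none =>
      match scanA lines next_goalie_handle 0 current_goalie_index with
      | some i => i
      | none => -1

-- ===== PORT B =====
-- B's single 'for i, line in enumerate(lines)' loop: i counts up, before is the fallback.
def bScan (handle : String) (cur : Int) : List String → Int → Int → Int
  | [], _, before => before
  | l :: rest, i, before =>
    if lineMatchesGoalie l handle then
      if i > cur then i
      else if i < cur ∧ before = -1 then bScan handle cur rest (i + 1) i
      else bScan handle cur rest (i + 1) before
    else bScan handle cur rest (i + 1) before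

def find_target_line_index_py_alt (lines : List String) (current_goalie_index : Int) (next_goalie_handle : String) : Int :=
  if current_goalie_index < 0 then -1
  else bScan next_goalie_handle current_goalie_index lines 0 (-1)

-- ===== PRECONDITION & SPEC =====
-- Pre_ excludes current_goalie_index > len(lines): there A's wrap-around loop indexes past the
-- end of lines and raises IndexError unless it happens to find a match first (B agrees with A
-- wherever A returns there too; the exclusion is only for the possible IndexError).
def Pre_find_target_line_index_py (lines : List String) (current_goalie_index : Int) (next_goalie_handle : String) : Prop :=
  current_goalie_index ≤ (lines.length : Int)
instance (lines : List String) (current_goalie_index : Int) (next_goalie_handle : String) : Decidable (Pre_find_target_line_index_py lines current_goalie_index next_goalie_handle) := by unfold Pre_find_target_line_index_py; infer_instance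

def pvWitness_find_target_line_index_py : List String × Int × String := (["**@alice** | Mon", "@bob | Tue"], 0, "@bob")

def Spec_find_target_line_index_py (lines : List String) (current_goalie_index : Int) (next_goalie_handle : String) (out : Int) : Prop := out = find_target_line_index_py_alt lines current_goalie_index next_goalie_handle
instance (lines : List String) (current_goalie_index : Int) (next_goalie_handle : String) (out : Int) : Decidable (Spec_find_target_line_index_py lines current_goalie_index next_goalie_handle out) := by unfold Spec_find_target_line_index_py; infer_instance

-- ===== CLAIM (what is proved, stated in full; the proofs are below) =====
def Claim_equal_find_target_line_index_py : Prop := ∀ (lines : List String) (current_goalie_index : Int) (next_goalie_handle : String), Dom_find_target_line_index_py lines current_goalie_index next_goalie_handle → Pre_find_target_line_index_py lines current_goalie_index next_goalie_handle → Spec_find_target_line_index_py lines current_goalie_index next_goalie_handle (find_target_line_index_py lines current_goalie_index next_goalie_handle)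

-- ===== LEMMAS AND PROOFS =====

lemma pvWitness_ok : Dom_find_target_line_index_py pvWitness_find_target_line_index_py.1 pvWitness_find_target_line_index_py.2.1 pvWitness_find_target_line_index_py.2.2 ∧ Pre_find_target_line_index_py pvWitness_find_target_line_index_py.1 pvWitness_find_target_line_index_py.2.1 pvWitness_find_target_line_index_py.2.2 := by
  constructor <;> decide

lemma scanA_stop (lines : List String) (handle : String) (i b : Int) (h : ¬ i < b) :
    scanA lines handle i b = none := by
  rw [scanA]; simp [h]

lemma scanA_step (lines : List String) (handle : String) (i b : Int) (h : i < b) :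
    scanA lines handle i b =
      if lineMatchesGoalie ((PySem.List.pyGet? lines i).getD "") handle then some i
      else scanA lines handle (i + 1) b := by
  rw [scanA]; simp [h]

-- the invariant of B's loop, stated against A's two scans, from position k onward
lemma bScan_eq (lines : List String) (handle : String) (cur : Int)
    (hle : cur ≤ (lines.length : Int)) :
    ∀ (k : Nat) (before : Int),
      bScan handle cur (lines.drop k) (k : Int) before =
        match scanA lines handle (max (k : Int) (cur + 1)) (lines.length : Int) with
        | some j => j
        | none =>
          if before = -1 then
            match scanA lines handle (k : Int) cur with
            | some j => j
            | none => -1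
          else before := by
  suffices H : ∀ (d k : Nat) (before : Int), lines.length ≤ k + d →
      bScan handle cur (lines.drop k) (k : Int) before =
        match scanA lines handle (max (k : Int) (cur + 1)) (lines.length : Int) with
        | some j => j
        | none =>
          if before = -1 then
            match scanA lines handle (k : Int) cur with
            | some j => j
            | none => -1
          else before by
    intro k before; exact H lines.length k before (by omega)
  intro d
  induction d with
  | zero =>
    intro k before hk
    have hk' : lines.length ≤ k := by omega
    rw [List.drop_eq_nil_of_le hk']
    rw [scanA_stop lines handle _ _ (by omega)]
    rw [scanA_stop lines handle (k : Int) cur (by omega)]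
    simp only [bScan]
    split <;> simp_all
  | succ d ih =>
    intro k before hk
    by_cases hklen : lines.length ≤ k
    · rw [List.drop_eq_nil_of_le hklen]
      rw [scanA_stop lines handle _ _ (by omega)]
      rw [scanA_stop lines handle (k : Int) cur (by omega)]
      simp only [bScan]
      split <;> simp_all
    · push_neg at hklen
      have hdrop : lines.drop k = lines[k] :: lines.drop (k + 1) :=
        List.drop_eq_getElem_cons hklen
      have hget : (PySem.List.pyGet? lines (k : Int)).getD "" = lines[k] := by
        simp [PySem.List.pyGet?_natCast, List.getElem?_eq_getElem hklen]
      rw [hdrop]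
      simp only [bScan]
      by_cases hm : lineMatchesGoalie lines[k] handle
      · rw [if_pos hm]
        by_cases hgt : (k : Int) > cur
        · -- first match after cur: both sides return k
          rw [if_pos hgt]
          have hmax : max (k : Int) (cur + 1) = (k : Int) := by omega
          rw [hmax, scanA_step lines handle (k : Int) _ (by exact_mod_cast hklen), hget,
            if_pos hm]
        · rw [if_neg hgt]
          have hmax : max (k : Int) (cur + 1) = cur + 1 := by omega
          have hmax' : max ((k : Int) + 1) (cur + 1) = cur + 1 := by omega
          by_cases hlt : (k : Int) < cur ∧ before = -1
          · rw [if_pos hlt]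
            have := ih (k + 1) (k : Int) (by omega)
            push_cast at this ⊢
            rw [this, hmax, hmax']
            -- the fallback branch: scanA k cur finds k; k ≥ 0 so k ≠ -1
            rw [scanA_step lines handle (k : Int) cur hlt.1, hget, if_pos hm]
            split <;> simp [hlt.2]
          · rw [if_neg hlt]
            have := ih (k + 1) before (by omega)
            push_cast at this ⊢
            rw [this, hmax, hmax']
            by_cases hb : before = -1
            · -- then ¬ k < cur, so k = cur and scanA k cur stops immediately
              have hkc : ¬ (k : Int) < cur := fun h => hlt ⟨h, hb⟩
              rw [scanA_stop lines handle (k : Int) cur hkc,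
                scanA_stop lines handle ((k : Int) + 1) cur (by omega)]
            · split <;> simp [hb]
      · rw [if_neg hm]
        have := ih (k + 1) before (by omega)
        push_cast at this ⊢
        rw [this]
        have h1 : scanA lines handle (max (k : Int) (cur + 1)) (lines.length : Int) =
            scanA lines handle (max ((k : Int) + 1) (cur + 1)) (lines.length : Int) := by
          by_cases hkc : (k : Int) + 1 ≤ cur + 1
          · have : max (k : Int) (cur + 1) = cur + 1 := by omega
            have h2 : max ((k : Int) + 1) (cur + 1) = cur + 1 := by omega
            rw [this, h2]
          · have h3 : max (k : Int) (cur + 1) = (k : Int) := by omega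
            have h4 : max ((k : Int) + 1) (cur + 1) = (k : Int) + 1 := by omega
            rw [h3, h4, scanA_step lines handle (k : Int) _ (by exact_mod_cast hklen), hget,
              if_neg hm]
        have h2 : (match scanA lines handle (k : Int) cur with
              | some j => j | none => (-1 : Int)) =
            (match scanA lines handle ((k : Int) + 1) cur with
              | some j => j | none => (-1 : Int)) := by
          by_cases hkc : (k : Int) < cur
          · rw [scanA_step lines handle (k : Int) cur hkc, hget, if_neg hm]
          · rw [scanA_stop lines handle (k : Int) cur hkc,
              scanA_stop lines handle ((k : Int) + 1) cur (by omega)]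
        rw [h1]
        split <;> simp_all

-- ===== VERDICT (by name: the statement is the Claim_ definition above) =====
theorem find_target_line_index_py_spec : Claim_equal_find_target_line_index_py := by
  intro lines cur handle _ hpre
  unfold Spec_find_target_line_index_py find_target_line_index_py find_target_line_index_py_alt
  by_cases hneg : cur < 0
  · simp [hneg]
  · rw [if_neg hneg, if_neg hneg]
    have h0 : bScan handle cur lines 0 (-1) =
        bScan handle cur (lines.drop 0) ((0 : Nat) : Int) (-1) := by norm_num
    rw [h0, bScan_eq lines handle cur hpre 0 (-1)]
    have hmax : max ((0 : Nat) : Int) (cur + 1) = cur + 1 := by omega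
    rw [hmax]
    simp
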